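-- pv_equiv track=rewrite | github.com/Roshansingh9/magicpin-ai-challenge | composer.py | resolve_digest_item
-- ===== SOURCE A (Python) =====
-- def safe_first(seq, default=None):
--     if isinstance(seq, list) and seq:
--         return seq[0]
--     return default
--
-- def resolve_digest_item(category, trigger):
--     digest = category.get("digest") or []
--     payload = trigger.get("payload") or {}
--     for key in ("top_item_id", "digest_item_id", "alert_id"):
--         item_id = payload.get(key)
--         if item_id:
--             for item in digest:
--                 if item.get("id") == item_id:
--                     return item
--     return safe_first(digest)
-- ===== SOURCE B (Python) =====
-- def safe_first(seq, default=None):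
--     if isinstance(seq, list) and seq:
--         return seq[0]
--     return default
--
-- def resolve_digest_item(category, trigger):
--     # Loop inversion: ONE pass over the digest filling a first-match slot per
--     # candidate key, then pick the highest-priority filled slot.
--     digest = category.get("digest") or []
--     payload = trigger.get("payload") or {}
--     targets = [payload.get(k) for k in ("top_item_id", "digest_item_id", "alert_id")]
--     hits = [None, None, None]
--     for item in digest:
--         item_id = item.get("id")
--         for i, t in enumerate(targets):
--             if hits[i] is None and t and item_id == t:
--                 hits[i] = item
--     for hit in hits:
--         if hit is not None:
--             return hit
--     return safe_first(digest)
-- ===== Notes on version B (the rewrite author's own statement) =====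
-- stated objective: alternative
-- what changed: Inverts the loop nesting: instead of A's key-major repeated scans of the digest, B makes a single digest-major pass filling a first-match slot for each of the three candidate ids, then returns the highest-priority filled slot.
import Mathlib
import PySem

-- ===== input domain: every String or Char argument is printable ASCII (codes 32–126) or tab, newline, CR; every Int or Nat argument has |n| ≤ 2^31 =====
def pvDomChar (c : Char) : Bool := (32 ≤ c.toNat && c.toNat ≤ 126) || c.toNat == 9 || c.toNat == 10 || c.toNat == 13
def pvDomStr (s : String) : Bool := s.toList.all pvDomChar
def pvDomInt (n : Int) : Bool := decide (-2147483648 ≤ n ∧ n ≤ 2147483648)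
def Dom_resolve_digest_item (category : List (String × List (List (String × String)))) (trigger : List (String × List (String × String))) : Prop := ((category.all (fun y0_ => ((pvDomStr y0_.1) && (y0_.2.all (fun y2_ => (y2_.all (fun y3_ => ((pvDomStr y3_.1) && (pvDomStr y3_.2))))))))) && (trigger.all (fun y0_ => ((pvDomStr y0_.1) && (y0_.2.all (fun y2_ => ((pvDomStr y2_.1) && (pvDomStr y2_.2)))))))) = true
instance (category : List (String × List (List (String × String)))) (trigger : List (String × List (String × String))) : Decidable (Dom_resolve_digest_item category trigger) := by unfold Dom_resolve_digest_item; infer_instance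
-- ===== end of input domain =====

-- B inverts the loop nesting: a single digest-major pass fills a first-match slot per candidate
-- key, then the highest-priority filled slot is returned (objective: alternative).

-- ===== PORT A =====
-- inner 'for item in digest: if item.get("id") == item_id: return item'
def pvAFind (digest : List (List (String × String))) (item_id : String) : Option (List (String × String)) :=
  match digest with
  | [] => none
  | item :: rest =>
      if (PySem.Dict.mk item).get? "id" == some item_id then some item
      else pvAFind rest item_id

-- outer 'for key in (...)', falling through to safe_first(digest)
def pvALoop (digest : List (List (String × String))) (payload : List (String × String))
    (keys : List String) : Option (List (String × String)) :=
  match keys with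
  | [] => digest.head?   -- safe_first(digest): first element if non-empty list, else None
  | key :: ks =>
      match (PySem.Dict.mk payload).get? key with
      | some item_id =>
          if item_id ≠ "" then
            match pvAFind digest item_id with
            | some item => some item
            | none => pvALoop digest payload ks
          else pvALoop digest payload ks
      | none => pvALoop digest payload ks

def resolve_digest_item (category : List (String × List (List (String × String)))) (trigger : List (String × List (String × String))) : Option (List (String × String)) :=
  let digest := ((PySem.Dict.mk category).get? "digest").getD []
  let payload := ((PySem.Dict.mk trigger).get? "payload").getD []
  pvALoop digest payload ["top_item_id", "digest_item_id", "alert_id"]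

-- ===== PORT B =====
-- the condition 'hits[i] is None and t and item_id == t' without the hits[i] part:
-- 't and item_id == t' (targets[i] may be absent = none, Python None, which is falsy)
def pvHit (t : Option String) (item_id : Option String) : Bool :=
  match t with
  | some s => !(s == "") && (item_id == some s)
  | none => false

-- one iteration of 'for item in digest' updating the three hit slots
def pvStep (targets : Option String × Option String × Option String)
    (hits : Option (List (String × String)) × Option (List (String × String)) × Option (List (String × String)))
    (item : List (String × String)) :
    Option (List (String × String)) × Option (List (String × String)) × Option (List (String × String)) :=
  let item_id := (PySem.Dict.mk item).get? "id"
  (if hits.1.isNone && pvHit targets.1 item_id then some item else hits.1,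
   if hits.2.1.isNone && pvHit targets.2.1 item_id then some item else hits.2.1,
   if hits.2.2.isNone && pvHit targets.2.2 item_id then some item else hits.2.2)

def resolve_digest_item_alt (category : List (String × List (List (String × String)))) (trigger : List (String × List (String × String))) : Option (List (String × String)) :=
  let digest := ((PySem.Dict.mk category).get? "digest").getD []
  let payload := ((PySem.Dict.mk trigger).get? "payload").getD []
  -- targets = [payload.get(k) for k in (...)]
  let targets := ((PySem.Dict.mk payload).get? "top_item_id",
                  (PySem.Dict.mk payload).get? "digest_item_id",
                  (PySem.Dict.mk payload).get? "alert_id")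
  let hits := digest.foldl (pvStep targets) (none, none, none)
  -- 'for hit in hits: if hit is not None: return hit' then safe_first(digest)
  match hits.1 with
  | some hit => some hit
  | none =>
    match hits.2.1 with
    | some hit => some hit
    | none =>
      match hits.2.2 with
      | some hit => some hit
      | none => digest.head?

-- ===== PRECONDITION & SPEC =====
def Spec_resolve_digest_item (category : List (String × List (List (String × String)))) (trigger : List (String × List (String × String))) (out : Option (List (String × String))) : Prop := out = resolve_digest_item_alt category trigger
instance (category : List (String × List (List (String × String)))) (trigger : List (String × List (String × String))) (out : Option (List (String × String))) : Decidable (Spec_resolve_digest_item category trigger out) := by unfold Spec_resolve_digest_item; infer_instance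

-- ===== CLAIM (what is proved, stated in full; the proofs are below) =====
def Claim_equal_resolve_digest_item : Prop := ∀ (category : List (String × List (List (String × String)))) (trigger : List (String × List (String × String))), Dom_resolve_digest_item category trigger → Spec_resolve_digest_item category trigger (resolve_digest_item category trigger)

-- ===== LEMMAS AND PROOFS =====

-- a single hit slot, as its own fold
def pvUpd (t : Option String) (h : Option (List (String × String)))
    (item : List (String × String)) : Option (List (String × String)) :=
  if h.isNone && pvHit t ((PySem.Dict.mk item).get? "id") then some item else h

-- first digest item satisfying pvHit t
def pvFindHit (digest : List (List (String × String))) (t : Option String) :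
    Option (List (String × String)) :=
  match digest with
  | [] => none
  | item :: rest =>
      if pvHit t ((PySem.Dict.mk item).get? "id") then some item else pvFindHit rest t

-- the fold over the triple is three independent folds
theorem pvStep_split (ts : Option String × Option String × Option String)
    (digest : List (List (String × String)))
    (a b c : Option (List (String × String))) :
    digest.foldl (pvStep ts) (a, b, c)
      = (digest.foldl (pvUpd ts.1) a, digest.foldl (pvUpd ts.2.1) b,
         digest.foldl (pvUpd ts.2.2) c) := by
  induction digest generalizing a b c with
  | nil => rfl
  | cons item rest ih => simp [List.foldl_cons, pvStep, pvUpd, ih]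

theorem pvUpd_some (t : Option String) (digest : List (List (String × String)))
    (x : List (String × String)) :
    digest.foldl (pvUpd t) (some x) = some x := by
  induction digest with
  | nil => rfl
  | cons item rest ih => simp [List.foldl_cons, pvUpd, ih]

theorem pvUpd_none (t : Option String) (digest : List (List (String × String))) :
    digest.foldl (pvUpd t) none = pvFindHit digest t := by
  induction digest with
  | nil => rfl
  | cons item rest ih =>
      simp only [List.foldl_cons, pvUpd, Option.isNone_none, Bool.true_and, pvFindHit]
      by_cases h : pvHit t ((PySem.Dict.mk item).get? "id") = true
      · simp [h, pvUpd_some]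
      · simp [h, ih]

theorem pvFindHit_none (digest : List (List (String × String))) :
    pvFindHit digest none = none := by
  induction digest with
  | nil => rfl
  | cons item rest ih => simp [pvFindHit, pvHit, ih]

theorem pvFindHit_some (digest : List (List (String × String))) (s : String) :
    pvFindHit digest (some s) = if s = "" then none else pvAFind digest s := by
  induction digest with
  | nil => simp [pvFindHit, pvAFind]
  | cons item rest ih =>
      simp only [pvFindHit, pvAFind, pvHit]
      by_cases hs : s = ""
      · subst hs; simp [ih]
      · simp only [hs, ih]
        simp [hs]

-- one level of the key cascade: a slot lookup equals A's scan for that key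
theorem pvLevel (digest : List (List (String × String))) (payload : List (String × String))
    (key : String) (ks : List String) (rest : Option (List (String × String)))
    (h : rest = pvALoop digest payload ks) :
    (match pvFindHit digest ((PySem.Dict.mk payload).get? key) with
     | some hit => some hit
     | none => rest) = pvALoop digest payload (key :: ks) := by
  cases hk : (PySem.Dict.mk payload).get? key with
  | none => simp [pvFindHit_none, pvALoop, hk, h]
  | some s =>
      by_cases hs : s = ""
      · simp [pvFindHit_some, hs, pvALoop, hk, h]
      · simp only [pvFindHit_some, hs, pvALoop, hk]
        cases pvAFind digest s <;> simp [h, hs]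

-- ===== VERDICT (by name: the statement is the Claim_ definition above) =====
theorem resolve_digest_item_spec : Claim_equal_resolve_digest_item := by
  intro category trigger _
  unfold Spec_resolve_digest_item resolve_digest_item resolve_digest_item_alt
  simp only [pvStep_split, pvUpd_none]
  exact (pvLevel _ _ "top_item_id" _ _
          (pvLevel _ _ "digest_item_id" _ _
            (pvLevel _ _ "alert_id" _ _ rfl))).symm
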